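-- pv_equiv track=rewrite | github.com/grahammorehead/chinese_segmentation | utils.py | get_labels_from_sample
-- ===== SOURCE A (Python) =====
-- def get_labels_from_sample(sample):
--     """
--     Each label of Chinese words having at most N-1 elements, assuming that it contains N characters that may be grouped.
--
--     Parameters
--     ----------
--     sample : list of N characters
--
--     Returns
--     -------
--     list of N-1 float on [0,1] (0 represents no split)
--     """
--     labels = []
--     for word in sample:
--         if len(word) > 1:
--             for _ in range(len(word)-1):
--                 labels.append(0)    # within a word, append a '0' for each interstice
--             labels.append(1)   # at the end of a word, append a '1'
--         else:
--             labels.append(1)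
--
--     labels = labels[:-1]   # Throw away the last value, it doesn't represent an interstice
--
--     return labels
-- ===== SOURCE B (Python) =====
-- def get_labels_from_sample(sample):
--     # alternative decomposition: compute block sizes up front, allocate a zero
--     # array, and scatter a 1 at the end of each block; drop the final slot.
--     bs = [max(len(w), 1) for w in sample]
--     total = sum(bs)
--     labels = [0] * total
--     idx = 0
--     for b in bs:
--         idx += b
--         labels[idx - 1] = 1
--     return labels[:-1]
-- ===== Notes on version B (the rewrite author's own statement) =====
-- stated objective: alternative
-- what changed: Instead of appending a 0 per interstice and a 1 per word end character-by-character, B computes per-word block sizes max(len(w),1) up front, allocates a zero list of the total length, scatters a 1 at each block boundary, and drops the last slot.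
import Mathlib
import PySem

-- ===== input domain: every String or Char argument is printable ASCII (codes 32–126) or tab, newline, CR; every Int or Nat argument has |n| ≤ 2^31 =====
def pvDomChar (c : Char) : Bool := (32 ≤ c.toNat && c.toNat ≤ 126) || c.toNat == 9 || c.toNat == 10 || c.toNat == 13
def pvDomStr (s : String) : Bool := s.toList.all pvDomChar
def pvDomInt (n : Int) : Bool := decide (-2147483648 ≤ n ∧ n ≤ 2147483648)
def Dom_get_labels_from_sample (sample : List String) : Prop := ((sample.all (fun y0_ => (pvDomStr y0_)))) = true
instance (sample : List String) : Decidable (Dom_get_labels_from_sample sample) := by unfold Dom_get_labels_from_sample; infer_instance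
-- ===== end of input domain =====

-- B replaces A's per-character append loops by a different decomposition: compute block
-- sizes up front, allocate a zero list, and scatter a 1 at each block boundary (objective: alternative).


-- ===== PORT A =====
def get_labels_from_sample (sample : List String) : List Int :=
  let labels : List Int := sample.foldl (fun acc w =>
    if w.toList.length > 1 then
      ((PySem.List.pyRange 0 ((w.toList.length : Int) - 1) 1).foldl (fun a _ => a ++ [(0 : Int)]) acc) ++ [1]
    else acc ++ [1]) []
  PySem.List.slice labels none (some (-1))

-- ===== PORT B =====
def get_labels_from_sample_alt (sample : List String) : List Int :=
  let bs : List Nat := sample.map (fun w => max (w.toList.length) 1)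
  let total : Nat := bs.sum
  let labels : List Int := List.replicate total 0
  let fin := bs.foldl (fun (st : List Int × Int) (b : Nat) =>
      (PySem.List.pySetD st.1 (st.2 + (b : Int) - 1) 1, st.2 + (b : Int))) (labels, 0)
  PySem.List.slice fin.1 none (some (-1))

-- ===== PRECONDITION & SPEC =====
def Spec_get_labels_from_sample (sample : List String) (out : List Int) : Prop := out = get_labels_from_sample_alt sample
instance (sample : List String) (out : List Int) : Decidable (Spec_get_labels_from_sample sample out) := by unfold Spec_get_labels_from_sample; infer_instance

-- ===== CLAIM (what is proved, stated in full; the proofs are below) =====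
def Claim_equal_get_labels_from_sample : Prop := ∀ (sample : List String), Dom_get_labels_from_sample sample → Spec_get_labels_from_sample sample (get_labels_from_sample sample)

-- ===== LEMMAS AND PROOFS =====

-- the label block contributed by one word of n characters (n = max(len,1) or plain len — same block)
def pvBlk (n : Nat) : List Int := List.replicate (n - 1) 0 ++ [1]

theorem pvBlk_length (n : Nat) (h : 1 ≤ n) : (pvBlk n).length = n := by
  simp [pvBlk]; omega

-- A's loop builds acc ++ concatenation of per-word blocks
theorem pvA_loop (sample : List String) (acc : List Int) :
    sample.foldl (fun acc w =>
      if w.toList.length > 1 then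
        ((PySem.List.pyRange 0 ((w.toList.length : Int) - 1) 1).foldl (fun a _ => a ++ [(0 : Int)]) acc) ++ [1]
      else acc ++ [1]) acc
    = acc ++ sample.flatMap (fun w => pvBlk w.toList.length) := by
  induction sample generalizing acc with
  | nil => simp
  | cons w ws ih =>
    simp only [List.foldl_cons, List.flatMap_cons, ih]
    by_cases h : w.toList.length > 1
    · simp only [if_pos h]
      have hr : (PySem.List.pyRange 0 ((w.toList.length : Int) - 1) 1).foldl (fun a _ => a ++ [(0 : Int)]) acc
          = acc ++ List.replicate (w.toList.length - 1) 0 := by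
        rw [PySem.List.foldl_append_singleton_eq_map]
        congr 1
        have hc : ((w.toList.length : Int) - 1) = ((w.toList.length - 1 : Nat) : Int) := by
          omega
        rw [hc, PySem.List.pyRange_zero_natCast, List.map_map]
        simp only [Function.comp_def]
        rw [List.map_const']
        simp
      rw [hr]
      unfold pvBlk
      simp
    · simp only [if_neg h]
      have h0 : pvBlk w.toList.length = [1] := by
        unfold pvBlk
        rw [show w.toList.length - 1 = 0 from by omega]
        rfl
      rw [h0]
      simp

-- B's scatter loop: setting a 1 at the end of each block turns a zero list into the block concatenation
theorem pvB_loop (bs : List Nat) (pre : List Int) (k : Nat)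
    (hpos : ∀ b ∈ bs, 1 ≤ b) (hsum : bs.sum ≤ k) :
    bs.foldl (fun (st : List Int × Int) (b : Nat) =>
        (PySem.List.pySetD st.1 (st.2 + (b : Int) - 1) 1, st.2 + (b : Int)))
      (pre ++ List.replicate k 0, (pre.length : Int))
    = (pre ++ bs.flatMap pvBlk ++ List.replicate (k - bs.sum) 0, ((pre.length + bs.sum : Nat) : Int)) := by
  induction bs generalizing pre k with
  | nil =>
    simp only [List.foldl_nil, List.flatMap_nil, List.sum_nil, List.append_nil,
      Nat.sub_zero, Nat.add_zero]
  | cons b bs ih =>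
    have hb : 1 ≤ b := hpos b (by simp)
    have hbk : b ≤ k := by simp only [List.sum_cons] at hsum; omega
    simp only [List.foldl_cons]
    have hidx : ((pre.length : Int) + (b : Int) - 1) = ((pre.length + (b - 1) : Nat) : Int) := by
      omega
    have hset : PySem.List.pySetD (pre ++ List.replicate k 0) ((pre.length : Int) + (b : Int) - 1) 1
        = (pre ++ pvBlk b) ++ List.replicate (k - b) 0 := by
      rw [hidx, PySem.List.pySetD_natCast,
          List.set_append_right (pre.length + (b - 1)) 1 (Nat.le_add_right _ _)]
      have h2 : (pre.length + (b - 1)) - pre.length = b - 1 := by omega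
      rw [h2]
      have h3 : (List.replicate k (0 : Int)).set (b - 1) 1
          = List.replicate (b - 1) 0 ++ 1 :: List.replicate (k - b) 0 := by
        rw [show k = (b - 1) + ((k - b) + 1) from by omega, ← List.replicate_append_replicate,
            List.replicate_succ, List.set_append_right _ _ (by simp)]
        simp
        omega
      rw [h3]
      simp [pvBlk]
    rw [hset]
    have hcast : ((pre.length : Int) + (b : Int)) = (((pre ++ pvBlk b).length : Nat) : Int) := by
      simp [pvBlk_length b hb]
    rw [hcast, ih (pre ++ pvBlk b) (k - b) (fun x hx => hpos x (by simp [hx]))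
        (by simp only [List.sum_cons] at hsum; omega)]
    simp only [List.sum_cons, List.flatMap_cons]
    have hk : k - b - bs.sum = k - (b + bs.sum) := by omega
    simp [hk, List.append_assoc, Nat.add_assoc, pvBlk_length b hb]

theorem pvBlk_max (n : Nat) : pvBlk (max n 1) = pvBlk n := by
  unfold pvBlk
  congr 2
  omega

theorem pvFlat_max (sample : List String) :
    (sample.map (fun w => max w.toList.length 1)).flatMap pvBlk
      = sample.flatMap (fun w => pvBlk w.toList.length) := by
  induction sample with
  | nil => rfl
  | cons w ws ih => simp only [List.map_cons, List.flatMap_cons, ih, pvBlk_max]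

-- ===== VERDICT (by name: the statement is the Claim_ definition above) =====
theorem get_labels_from_sample_spec : Claim_equal_get_labels_from_sample := by
  intro sample _
  unfold Spec_get_labels_from_sample get_labels_from_sample get_labels_from_sample_alt
  simp only
  rw [pvA_loop sample []]
  have hpos : ∀ b ∈ sample.map (fun w => max w.toList.length 1), 1 ≤ b := by
    intro b hb
    simp at hb
    obtain ⟨w, _, hw⟩ := hb
    omega
  have hB := pvB_loop (sample.map (fun w => max w.toList.length 1)) []
      ((sample.map (fun w => max w.toList.length 1)).sum) hpos le_rfl
  simp only [List.length_nil, Nat.cast_zero, List.nil_append, Nat.sub_self,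
    List.replicate_zero, List.append_nil, Nat.zero_add] at hB
  rw [hB, pvFlat_max]
  simp
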